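-- pv_equiv track=rewrite | github.com/SwathyJagannatha/InterviewPrep | dup1.py | remove3ConsecutiveDuplicates
-- ===== SOURCE A (Python) =====
-- def remove3ConsecutiveDuplicates(string):
--     val = ""
--     i = 0
--     while (i < len(string)):
--         if (i < len(string) - 2 and
--             string[i] * 3 == string[i:i + 3]):
--             i += 3
--         else:
--             val += string[i]
--             i += 1
--
--     if (len(val) == len(string)):
--         return val
--     else:
--         return remove3ConsecutiveDuplicates(val)
--
-- string = "aabbbaccddddc"
--
-- val = remove3ConsecutiveDuplicates(string)
-- ===== SOURCE B (Python) =====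
-- def remove3ConsecutiveDuplicates(string):
--     stack = []  # run-length stack: (char, count), count is 1 or 2
--     for ch in string:
--         if stack and stack[-1][0] == ch:
--             if stack[-1][1] == 2:
--                 stack.pop()
--             else:
--                 stack[-1] = (ch, stack[-1][1] + 1)
--         else:
--             stack.append((ch, 1))
--     return "".join(c * k for c, k in stack)
-- ===== Notes on version B (the rewrite author's own statement) =====
-- stated objective: faster
-- what changed: Replaces A's repeated full scans (rescan the string until a pass removes nothing) with a single left-to-right pass over a (char,count) stack that pops a run when its count reaches 3.
import Mathlib
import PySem

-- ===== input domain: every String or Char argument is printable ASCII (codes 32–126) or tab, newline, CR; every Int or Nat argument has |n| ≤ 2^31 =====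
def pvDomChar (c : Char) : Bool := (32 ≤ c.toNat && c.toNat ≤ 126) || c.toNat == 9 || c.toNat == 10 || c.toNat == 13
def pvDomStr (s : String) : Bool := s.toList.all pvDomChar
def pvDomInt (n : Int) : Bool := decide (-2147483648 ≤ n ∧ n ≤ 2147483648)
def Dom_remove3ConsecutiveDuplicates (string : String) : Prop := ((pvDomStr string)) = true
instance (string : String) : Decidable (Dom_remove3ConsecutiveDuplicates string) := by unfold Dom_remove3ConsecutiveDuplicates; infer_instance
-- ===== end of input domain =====

-- B replaces A's rescan-until-stable removal of triples with a single-pass (char,count) stack; equivalence of the return value on all inputs.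

-- ===== PORT A =====
-- A's while loop over the remaining suffix: skip 3 when the next 3 chars are equal, else copy one.
def passA : List Char → List Char
  | a :: b :: c :: rest =>
      if a = b ∧ a = c then passA rest
      else a :: passA (b :: c :: rest)
  | l => l

theorem passA_length_le (l : List Char) : (passA l).length ≤ l.length := by
  induction l using passA.induct with
  | case1 a b c rest h ih =>
      simp only [passA, if_pos h, List.length_cons]
      omega
  | case2 a b c rest h ih =>
      simp only [passA, if_neg h, List.length_cons]
      simp only [List.length_cons] at ih
      omega
  | case3 l h =>
      rcases l with _ | ⟨a, _ | ⟨b, _ | ⟨c, t⟩⟩⟩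
      · exact le_refl _
      · exact le_refl _
      · exact le_refl _
      · exact absurd rfl (h a b c t)

def remove3ConsecutiveDuplicatesList (l : List Char) : List Char :=
  if (passA l).length = l.length then passA l
  else remove3ConsecutiveDuplicatesList (passA l)
termination_by l.length
decreasing_by
  have := passA_length_le l
  omega

def remove3ConsecutiveDuplicates (string : String) : String :=
  String.ofList (remove3ConsecutiveDuplicatesList string.toList)

-- ===== PORT B =====
-- one step of Source B's loop; list head = top of the Python stack
def stepB (st : List (Char × Nat)) (ch : Char) : List (Char × Nat) :=
  match st with
  | (c, k) :: rest =>
      if c = ch then (if k = 2 then rest else (c, k + 1) :: rest)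
      else (ch, 1) :: (c, k) :: rest
  | [] => [(ch, 1)]

-- "".join(c * k for c, k in stack)  (Python stack is bottom-to-top = our list reversed)
def renderB (st : List (Char × Nat)) : List Char :=
  st.reverse.flatMap (fun p => List.replicate p.2 p.1)

def remove3ConsecutiveDuplicates_alt (string : String) : String :=
  String.ofList (renderB (string.toList.foldl stepB []))

-- ===== PRECONDITION & SPEC =====
def Spec_remove3ConsecutiveDuplicates (string : String) (out : String) : Prop := out = remove3ConsecutiveDuplicates_alt string
instance (string : String) (out : String) : Decidable (Spec_remove3ConsecutiveDuplicates string out) := by unfold Spec_remove3ConsecutiveDuplicates; infer_instance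

-- ===== CLAIM (what is proved, stated in full; the proofs are below) =====
def Claim_equal_remove3ConsecutiveDuplicates : Prop := ∀ (string : String), Dom_remove3ConsecutiveDuplicates string → Spec_remove3ConsecutiveDuplicates string (remove3ConsecutiveDuplicates string)

-- ===== LEMMAS AND PROOFS =====

-- adjacent stack entries carry distinct characters
def sepB : List (Char × Nat) → Prop
  | p :: q :: rest => p.1 ≠ q.1 ∧ sepB (q :: rest)
  | _ => True

-- stack invariant: adjacent runs distinct, counts 1 or 2
def InvB (st : List (Char × Nat)) : Prop :=
  sepB st ∧ ∀ p ∈ st, p.2 = 1 ∨ p.2 = 2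

-- l contains no 3 consecutive equal characters
def noTriple (l : List Char) : Prop := ¬ ∃ u a v, l = u ++ a :: a :: a :: v

theorem sepB_tail (p : Char × Nat) (l : List (Char × Nat)) (h : sepB (p :: l)) : sepB l := by
  match l with
  | [] => trivial
  | q :: rest => exact h.2

theorem sepB_retag (c : Char) (k k' : Nat) (rest : List (Char × Nat))
    (h : sepB ((c, k) :: rest)) : sepB ((c, k') :: rest) := by
  match rest with
  | [] => trivial
  | q :: r => exact ⟨h.1, h.2⟩

theorem stepB_inv (st : List (Char × Nat)) (a : Char) (h : InvB st) : InvB (stepB st a) := by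
  obtain ⟨hc, hk⟩ := h
  match st with
  | [] => exact ⟨trivial, by simp [stepB]⟩
  | (c, k) :: rest =>
    simp only [stepB]
    split_ifs with h1 h2
    · exact ⟨sepB_tail _ _ hc, fun p hp => hk p (List.mem_cons_of_mem _ hp)⟩
    · refine ⟨sepB_retag c k (k + 1) rest hc, ?_⟩
      intro p hp
      have hk1 : k = 1 ∨ k = 2 := hk (c, k) (by simp)
      rcases List.mem_cons.mp hp with h | h
      · subst h; simp; omega
      · exact hk p (List.mem_cons_of_mem _ h)
    · refine ⟨⟨fun he => h1 he.symm, hc⟩, ?_⟩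
      intro p hp
      rcases List.mem_cons.mp hp with h | h
      · subst h; left; rfl
      · exact hk p h

theorem stepB3 (st : List (Char × Nat)) (a : Char) (h : InvB st) :
    stepB (stepB (stepB st a) a) a = st := by
  obtain ⟨hc, hk⟩ := h
  match st with
  | [] => simp [stepB]
  | (c, k) :: rest =>
    have hk1 : k = 1 ∨ k = 2 := hk (c, k) (by simp)
    by_cases hca : c = a
    · subst hca
      match rest with
      | [] =>
        rcases hk1 with h1 | h1 <;> subst h1 <;> simp [stepB]
      | (d, j) :: rest' =>
        have hdc : c ≠ d := hc.1
        rcases hk1 with h1 | h1 <;> subst h1 <;>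
          simp [stepB, Ne.symm hdc]
    · simp [stepB, hca]

theorem passA_cons3 (a b c : Char) (rest : List Char) :
    passA (a :: b :: c :: rest) =
      if a = b ∧ a = c then passA rest else a :: passA (b :: c :: rest) := rfl

theorem foldl_passA (l : List Char) (st : List (Char × Nat)) (h : InvB st) :
    List.foldl stepB st (passA l) = List.foldl stepB st l := by
  induction l using passA.induct generalizing st with
  | case1 a b c rest htr ih =>
    obtain ⟨h1, h2⟩ := htr
    subst h1; subst h2
    rw [passA_cons3, if_pos (⟨rfl, rfl⟩ : a = a ∧ a = a)]
    rw [ih st h]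
    simp only [List.foldl_cons]
    rw [stepB3 st a h]
  | case2 a b c rest htr ih =>
    rw [passA_cons3, if_neg htr]
    simp only [List.foldl_cons]
    exact ih (stepB st a) (stepB_inv st a h)
  | case3 l hlen =>
    rcases l with _ | ⟨a, _ | ⟨b, _ | ⟨c, t⟩⟩⟩
    · rfl
    · rfl
    · rfl
    · exact absurd rfl (hlen a b c t)

theorem renderB_cons (c : Char) (k : Nat) (rest : List (Char × Nat)) :
    renderB ((c, k) :: rest) = renderB rest ++ List.replicate k c := by
  simp [renderB]

theorem renderB_noTriple (l : List Char) (st : List (Char × Nat)) (h : InvB st)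
    (hnt : noTriple (renderB st ++ l)) :
    renderB (List.foldl stepB st l) = renderB st ++ l := by
  induction l generalizing st with
  | nil => simp
  | cons a t ih =>
    simp only [List.foldl_cons]
    match st with
    | [] =>
      have hs : stepB [] a = [(a, 1)] := rfl
      have hr : renderB [(a, 1)] = renderB ([] : List (Char × Nat)) ++ [a] := by
        simp [renderB]
      rw [hs, ih [(a, 1)] ⟨trivial, by simp⟩ (by rw [hr]; simpa using hnt), hr]
      simp
    | (c, k) :: rest =>
      obtain ⟨hc, hk⟩ := h
      have hk1 : k = 1 ∨ k = 2 := hk (c, k) (by simp)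
      by_cases hca : c = a
      · subst hca
        rcases hk1 with h1 | h1
        · subst h1
          have hs : stepB ((c, 1) :: rest) c = (c, 2) :: rest := by simp [stepB]
          have hr : renderB ((c, 2) :: rest) = renderB ((c, 1) :: rest) ++ [c] := by
            simp [renderB_cons, List.replicate_succ]
          have hinv : InvB ((c, 2) :: rest) := by
            refine ⟨sepB_retag c 1 2 rest hc, ?_⟩
            intro p hp
            rcases List.mem_cons.mp hp with h | h
            · subst h; right; rfl
            · exact hk p (List.mem_cons_of_mem _ h)
          rw [hs, ih _ hinv (by rw [hr]; simpa using hnt), hr]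
          simp
        · exfalso
          subst h1
          apply hnt
          refine ⟨renderB rest, c, t, ?_⟩
          simp [renderB_cons, List.replicate_succ]
      · have hs : stepB ((c, k) :: rest) a = (a, 1) :: (c, k) :: rest := by
          simp [stepB, hca]
        have hr : renderB ((a, 1) :: (c, k) :: rest) = renderB ((c, k) :: rest) ++ [a] := by
          simp [renderB_cons, List.replicate_succ]
        have hinv : InvB ((a, 1) :: (c, k) :: rest) := by
          refine ⟨⟨fun he => hca he.symm, hc⟩, ?_⟩
          intro p hp
          rcases List.mem_cons.mp hp with h | h
          · subst h; left; rfl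
          · exact hk p h
        rw [hs, ih _ hinv (by rw [hr]; simpa using hnt), hr]
        simp

theorem passA_eq_of_length (l : List Char) (h : (passA l).length = l.length) : passA l = l := by
  induction l using passA.induct with
  | case1 a b c rest htr ih =>
    exfalso
    rw [passA_cons3, if_pos htr] at h
    have := passA_length_le rest
    simp only [List.length_cons] at h
    omega
  | case2 a b c rest htr ih =>
    rw [passA_cons3, if_neg htr] at h ⊢
    simp only [List.length_cons] at h
    rw [ih (by simpa using h)]
  | case3 l hlen =>
    rcases l with _ | ⟨a, _ | ⟨b, _ | ⟨c, t⟩⟩⟩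
    · rfl
    · rfl
    · rfl
    · exact absurd rfl (hlen a b c t)

theorem noTriple_of_passA_eq (l : List Char) (h : passA l = l) : noTriple l := by
  induction l using passA.induct with
  | case1 a b c rest htr ih =>
    exfalso
    rw [passA_cons3, if_pos htr] at h
    have h1 := passA_length_le rest
    have h2 := congrArg List.length h
    simp only [List.length_cons] at h2
    omega
  | case2 a b c rest htr ih =>
    rw [passA_cons3, if_neg htr] at h
    have h2 : passA (b :: c :: rest) = b :: c :: rest := by injection h
    have hnt := ih h2
    rintro ⟨u, x, v, he⟩
    rcases u with _ | ⟨y, u'⟩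
    · simp only [List.nil_append] at he
      injection he with e1 he
      injection he with e2 he
      injection he with e3 he
      exact htr ⟨e1.trans e2.symm, e1.trans e3.symm⟩
    · rw [List.cons_append] at he
      injection he with e1 he
      exact hnt ⟨u', x, v, he⟩
  | case3 l hlen =>
    rintro ⟨u, x, v, he⟩
    rcases l with _ | ⟨a, _ | ⟨b, _ | ⟨c, t⟩⟩⟩
    · have := congrArg List.length he; simp at this
    · have := congrArg List.length he; simp at this; omega
    · have := congrArg List.length he; simp at this; omega
    · exact absurd rfl (hlen a b c t)

theorem InvB_nil : InvB [] := ⟨trivial, by simp⟩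

theorem main_list_fuel (n : Nat) : ∀ (l : List Char), l.length ≤ n →
    remove3ConsecutiveDuplicatesList l = renderB (List.foldl stepB [] l) := by
  induction n with
  | zero =>
    intro l hl
    have hnil : l = [] := by
      cases l with
      | nil => rfl
      | cons a t => simp at hl
    subst hnil
    rw [remove3ConsecutiveDuplicatesList]
    simp [passA, renderB]
  | succ n ih =>
    intro l hl
    rw [remove3ConsecutiveDuplicatesList]
    by_cases hlen : (passA l).length = l.length
    · rw [if_pos hlen]
      have hfix : passA l = l := passA_eq_of_length l hlen
      have hnt : noTriple l := noTriple_of_passA_eq l hfix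
      have hr := renderB_noTriple l [] InvB_nil (by simpa [renderB] using hnt)
      rw [hr]
      simpa [renderB] using hfix
    · rw [if_neg hlen]
      have hlt : (passA l).length < l.length :=
        lt_of_le_of_ne (passA_length_le l) hlen
      rw [ih (passA l) (by omega)]
      congr 1
      exact foldl_passA l [] InvB_nil

theorem main_list (l : List Char) :
    remove3ConsecutiveDuplicatesList l = renderB (List.foldl stepB [] l) :=
  main_list_fuel l.length l le_rfl

-- ===== VERDICT (by name: the statement is the Claim_ definition above) =====
theorem remove3ConsecutiveDuplicates_spec : Claim_equal_remove3ConsecutiveDuplicates := by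
  intro s _
  show remove3ConsecutiveDuplicates s = remove3ConsecutiveDuplicates_alt s
  unfold remove3ConsecutiveDuplicates remove3ConsecutiveDuplicates_alt
  rw [main_list]
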